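/- GENERATED by farm/mkstatement.py from design/units.tsv (unit `codebook_decode_scalar_raw.4`) and the assertions of Vorbis/Spec/Codebook/ScalarRaw.lean — do not edit.
   THE STATEMENT of the proof unit `codebook_decode_scalar_raw.4`: segment 4 of `codebook_decode_scalar_raw` (9 instructions; entries 0x10d775;
   exits ret; ranges 0x10d775-0x10d786)
   takes each of its entry assertions to one of its exit assertions (`Vorbis.Spec.ScalarRaw.Claim4`), given the contracts of its callees.
   What the names mean: Vorbis/Spec/Basic.lean (the shared hypotheses), Vorbis/Spec/Codebook/ScalarRaw.lean (the assertions). The theorem to prove: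
   `theorem codebook_decode_scalar_raw_4_ok : Vorbis.Spec.codebook_decode_scalar_raw_4.Statement`. -/
import Vorbis.Spec.Codebook.ScalarRaw
namespace Vorbis.Spec.codebook_decode_scalar_raw_4
open X86 X86.User Asan

/-- The statement of unit `codebook_decode_scalar_raw.4`. -/
def Statement : Prop :=
  ∀ (Lay : Layout) (_hLay : Lay.hi = 0x1000000) (μ : Microarch) (_hμ : UserX.MicroOK μ) (u₀ : State)
    (_hcode : HasCodeNat Lay u₀ Vorbis.L.codebook_decode_scalar_raw.entry Vorbis.Code.code_codebook_decode_scalar_raw.nat Vorbis.L.codebook_decode_scalar_raw.size),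
    Vorbis.Spec.ScalarRaw.Claim4 Lay μ u₀

end Vorbis.Spec.codebook_decode_scalar_raw_4
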